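-- pv_equiv track=rewrite | github.com/naveenjohnsonv/wsi-seg | src/wsi_seg/writer.py | _count_pyramid_levels
-- ===== SOURCE A (Python) =====
-- def _count_pyramid_levels(shape: tuple[int, ...], min_size: int) -> int:
--     count = 0
--     h, w = shape[0], shape[1]
--     effective_min = max(2, min_size)
--     while min(h, w) >= effective_min:
--         nh, nw = h // 2, w // 2
--         if nh == h and nw == w:
--             break
--         count += 1
--         h, w = nh, nw
--     return count
-- ===== SOURCE B (Python) =====
-- def _count_pyramid_levels(shape, min_size):
--     m = min(shape[0], shape[1])
--     return (max(0, m) // max(2, min_size)).bit_length()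
-- ===== Notes on version B (the rewrite author's own statement) =====
-- stated objective: simpler
-- what changed: Replaces the halving while-loop with a closed form: the number of levels equals the bit length of min(h,w) // max(2,min_size) (clamped at 0), a one-line O(1) expression.
import Mathlib
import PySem

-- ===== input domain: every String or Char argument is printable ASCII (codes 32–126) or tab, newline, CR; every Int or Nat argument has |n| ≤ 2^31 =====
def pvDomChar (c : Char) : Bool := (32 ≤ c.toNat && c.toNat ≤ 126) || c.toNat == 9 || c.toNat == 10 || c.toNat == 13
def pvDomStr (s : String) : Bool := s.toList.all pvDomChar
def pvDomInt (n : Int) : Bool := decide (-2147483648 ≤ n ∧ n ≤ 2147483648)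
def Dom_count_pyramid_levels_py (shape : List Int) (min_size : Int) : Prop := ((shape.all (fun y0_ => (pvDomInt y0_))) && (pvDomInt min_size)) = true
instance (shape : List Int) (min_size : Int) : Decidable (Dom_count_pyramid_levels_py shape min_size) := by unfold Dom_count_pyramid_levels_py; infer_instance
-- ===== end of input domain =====

-- B replaces A's halving while-loop by a closed form via bit_length (objective: simpler).
-- Both programs raise IndexError when shape has fewer than two entries; Pre_ excludes those inputs.

-- ===== PORT A =====
-- the while-loop of A: state (h, w, count); effective_min recomputed as the constant max 2 min_size
def pvLoopA (min_size h w count : Int) : Int :=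
  if min h w ≥ max 2 min_size then
    let nh := PySem.Int.floordiv h 2
    let nw := PySem.Int.floordiv w 2
    if nh = h ∧ nw = w then count
    else pvLoopA min_size nh nw (count + 1)
  else count
termination_by (h + w).toNat
decreasing_by
  rename_i hge _
  have h2 : 2 ≤ h ∧ 2 ≤ w := by constructor <;> omega
  rw [PySem.Int.floordiv_eq_ediv_of_pos (by omega), PySem.Int.floordiv_eq_ediv_of_pos (by omega)]
  omega

def count_pyramid_levels_py (shape : List Int) (min_size : Int) : Int :=
  match PySem.List.pyGet? shape 0, PySem.List.pyGet? shape 1 with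
  | some h, some w => pvLoopA min_size h w 0
  | _, _ => 0  -- IndexError in Python; excluded by Pre_

-- ===== PORT B =====
def count_pyramid_levels_py_alt (shape : List Int) (min_size : Int) : Int :=
  match PySem.List.pyGet? shape 0 with
  | none => 0  -- IndexError in Python; excluded by Pre_
  | some a =>
    match PySem.List.pyGet? shape 1 with
    | none => 0  -- IndexError in Python; excluded by Pre_
    | some b =>
      let m := min a b
      (PySem.Int.bitLength (PySem.Int.floordiv (max 0 m) (max 2 min_size)) : Int)

-- ===== PRECONDITION & SPEC =====
-- Pre_ excludes only the inputs where both Pythons raise IndexError (shape shorter than 2)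
def Pre_count_pyramid_levels_py (shape : List Int) (min_size : Int) : Prop := 2 ≤ shape.length
instance (shape : List Int) (min_size : Int) : Decidable (Pre_count_pyramid_levels_py shape min_size) := by unfold Pre_count_pyramid_levels_py; infer_instance
def pvWitness_count_pyramid_levels_py : List Int × Int := ([512, 768], 4)

def Spec_count_pyramid_levels_py (shape : List Int) (min_size : Int) (out : Int) : Prop := out = count_pyramid_levels_py_alt shape min_size
instance (shape : List Int) (min_size : Int) (out : Int) : Decidable (Spec_count_pyramid_levels_py shape min_size out) := by unfold Spec_count_pyramid_levels_py; infer_instance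

-- ===== CLAIM (what is proved, stated in full; the proofs are below) =====
def Claim_equal_count_pyramid_levels_py : Prop := ∀ (shape : List Int) (min_size : Int), Dom_count_pyramid_levels_py shape min_size → Pre_count_pyramid_levels_py shape min_size → Spec_count_pyramid_levels_py shape min_size (count_pyramid_levels_py shape min_size)

-- ===== LEMMAS AND PROOFS =====

-- the closed form that B computes from the state (h, w)
def pvClosed (min_size h w : Int) : Int :=
  (PySem.Int.bitLength (PySem.Int.floordiv (max 0 (min h w)) (max 2 min_size)) : Int)

lemma pvClosed_zero (min_size h w : Int) (hlt : min h w < max 2 min_size) :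
    pvClosed min_size h w = 0 := by
  unfold pvClosed
  have he : (0:Int) < max 2 min_size := by omega
  rw [PySem.Int.floordiv_eq_ediv_of_pos he]
  have : (max 0 (min h w)) / (max 2 min_size) = 0 := by
    apply Int.ediv_eq_zero_of_lt <;> omega
  rw [this, PySem.Int.bitLength_zero]
  rfl

lemma pvClosed_step (min_size h w : Int) (hge : max 2 min_size ≤ min h w) :
    pvClosed min_size h w
      = pvClosed min_size (PySem.Int.floordiv h 2) (PySem.Int.floordiv w 2) + 1 := by
  unfold pvClosed
  have he : (0:Int) < max 2 min_size := by omega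
  have h2 : (2:Int) ≤ h ∧ (2:Int) ≤ w := by constructor <;> omega
  rw [PySem.Int.floordiv_eq_ediv_of_pos he,
      PySem.Int.floordiv_eq_ediv_of_pos (by omega : (0:Int) < 2),
      PySem.Int.floordiv_eq_ediv_of_pos (by omega : (0:Int) < 2)]
  have hmin : min (h / 2) (w / 2) = (min h w) / 2 := by
    rcases le_total h w with hle | hle
    · rw [min_eq_left hle, min_eq_left (by omega)]
    · rw [min_eq_right hle, min_eq_right (by omega)]
  rw [hmin]
  have hm0 : (0:Int) ≤ min h w := by omega
  have hm2 : (0:Int) ≤ min h w / 2 := by omega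
  rw [max_eq_right hm0, max_eq_right hm2]
  rw [PySem.Int.floordiv_eq_ediv_of_pos he]
  have hdd : min h w / 2 / max 2 min_size = min h w / max 2 min_size / 2 := by
    rw [Int.ediv_ediv_of_nonneg, Int.ediv_ediv_of_nonneg, mul_comm] <;> omega
  rw [hdd]
  have hq1 : (1:Int) ≤ min h w / max 2 min_size := by
    apply Int.le_ediv_iff_mul_le he |>.mpr; omega
  have := PySem.Int.bitLength_of_pos (n := min h w / max 2 min_size) (by omega)
  rw [PySem.Int.floordiv_eq_ediv_of_pos (by omega : (0:Int) < 2)] at this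
  omega

lemma pvLoopA_closed (min_size h w count : Int) :
    pvLoopA min_size h w count = count + pvClosed min_size h w := by
  fun_induction pvLoopA min_size h w count with
  | case1 h w count hge nh nw hbrk =>
    -- break branch: unreachable since h ≥ 2 makes h // 2 ≠ h
    exfalso
    have h2 : (2:Int) ≤ h := by omega
    have hb1 : PySem.Int.floordiv h 2 = h := hbrk.1
    rw [PySem.Int.floordiv_eq_ediv_of_pos (by omega : (0:Int) < 2)] at hb1
    omega
  | case2 h w count hge nh nw hbrk ih =>
    rw [ih, pvClosed_step min_size h w (by omega)]
    ring
  | case3 h w count hlt =>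
    rw [pvClosed_zero min_size h w (by omega)]
    ring

-- ===== VERDICT (by name: the statement is the Claim_ definition above) =====
theorem count_pyramid_levels_py_spec : Claim_equal_count_pyramid_levels_py := by
  intro shape min_size _ hpre
  have hlen : 2 ≤ shape.length := hpre
  match shape, hlen with
  | a :: b :: rest, _ =>
  have h0 : PySem.List.pyGet? (a :: b :: rest) (0:Int) = some a :=
    PySem.List.pyGet?_zero_cons a (b :: rest)
  have h1 : PySem.List.pyGet? (a :: b :: rest) (1:Int) = some b := by
    rw [show (1:Int) = ((0:Nat):Int) + 1 from by norm_num, PySem.List.pyGet?_cons_succ]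
    simp
  unfold Spec_count_pyramid_levels_py count_pyramid_levels_py count_pyramid_levels_py_alt
  rw [h0, h1]
  simp [pvLoopA_closed, pvClosed]
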